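-- pv_equiv track=rewrite | github.com/kaluginpeter/Algorithms_and_structures_tasks | CodeWars/7kyu/How_many_urinals_are_free.py | get_free_urinals
-- ===== SOURCE A (Python) =====
-- def get_free_urinals(urinals):
--     if '11' in urinals: return -1
--     urinals_: list[str] = list(urinals)
--     free: int = 0
--     for i in range(len(urinals)):
--         if urinals_[i] == '0':
--             if (not i or urinals_[i - 1] == '0') and (i + 1 == len(urinals) or urinals_[i + 1] == '0'):
--                 urinals_[i] = '1'
--                 free += 1
--     return free
-- ===== SOURCE B (Python) =====
-- def get_free_urinals(urinals):
--     if '11' in urinals: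
--         return -1
--     total = 0
--     n = len(urinals)
--     i = 0
--     while i < n:
--         if urinals[i] == '0':
--             j = i
--             while j < n and urinals[j] == '0':
--                 j += 1
--             L = j - i
--             if i == 0 and j == n:
--                 total += (L + 1) // 2
--             elif i == 0 or j == n:
--                 total += L // 2
--             else:
--                 total += (L - 1) // 2
--             i = j
--         else:
--             i += 1
--     return total
-- ===== Notes on version B (the rewrite author's own statement) =====
-- stated objective: simpler
-- what changed: A simulates the greedy placement cell by cell, mutating a copy of the string and re-reading neighbours; B keeps the '11' guard and instead scans the string once for maximal runs of '0', adding a closed-form count per run ((L+1)//2 for a run spanning the whole string, L//2 for a run touching one edge, (L-1)//2 for an interior run).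
import Mathlib
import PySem

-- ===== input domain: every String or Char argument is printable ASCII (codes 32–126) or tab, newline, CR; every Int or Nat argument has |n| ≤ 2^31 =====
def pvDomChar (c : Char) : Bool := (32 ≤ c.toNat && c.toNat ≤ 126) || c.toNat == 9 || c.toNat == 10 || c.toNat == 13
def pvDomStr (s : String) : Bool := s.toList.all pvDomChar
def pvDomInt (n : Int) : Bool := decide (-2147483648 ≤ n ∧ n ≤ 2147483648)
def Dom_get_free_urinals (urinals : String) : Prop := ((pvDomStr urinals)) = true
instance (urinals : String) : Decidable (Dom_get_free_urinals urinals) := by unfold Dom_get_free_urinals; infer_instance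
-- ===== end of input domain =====

-- B replaces A's cell-by-cell greedy mutation of the list with a single scan over
-- maximal runs of '0's, adding a closed-form count per run (objective: simpler).

-- ===== PORT A =====
def get_free_urinals (urinals : String) : Int :=
  if PySem.Str.isIn "11" urinals then -1
  else
    let urinals_ : List Char := urinals.toList
    let st := (PySem.List.pyRange 0 (urinals_.length : Int) 1).foldl
      (fun (st : List Char × Int) (i : Int) =>
        if PySem.List.pyGetD st.1 i ' ' = '0' then
          if (i = 0 ∨ PySem.List.pyGetD st.1 (i - 1) ' ' = '0') ∧
             (i + 1 = (urinals_.length : Int) ∨ PySem.List.pyGetD st.1 (i + 1) ' ' = '0') then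
            (PySem.List.pySetD st.1 i '1', st.2 + 1)
          else st
        else st)
      (urinals_, 0)
    st.2

-- ===== PORT B =====
-- outer while-loop of Source B, one step per maximal run: on a '0' the inner while-loop
-- is takeWhile/dropWhile extracting the run; leftEdge tracks i == 0.
def pvAltGo : List Char → Bool → Int
  | [], _ => 0
  | c :: rest, leftEdge =>
    if h : c = '0' then
      (if leftEdge = true ∧ (c :: rest).dropWhile (fun x => x = '0') = [] then
         PySem.Int.floordiv ((((c :: rest).takeWhile (fun x => x = '0')).length : Int) + 1) 2
       else if leftEdge = true ∨ (c :: rest).dropWhile (fun x => x = '0') = [] then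
         PySem.Int.floordiv (((c :: rest).takeWhile (fun x => x = '0')).length : Int) 2
       else PySem.Int.floordiv ((((c :: rest).takeWhile (fun x => x = '0')).length : Int) - 1) 2)
      + pvAltGo ((c :: rest).dropWhile (fun x => x = '0')) false
    else pvAltGo rest false
termination_by cs _ => cs.length
decreasing_by
  · simp only [List.dropWhile]
    have : (List.dropWhile (fun x => x = '0') rest).length ≤ rest.length :=
      List.length_dropWhile_le _ _
    simp [h]
    omega
  · simp


def get_free_urinals_alt (urinals : String) : Int :=
  if PySem.Str.isIn "11" urinals then -1
  else pvAltGo urinals.toList true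

-- ===== PRECONDITION & SPEC =====
def Spec_get_free_urinals (urinals : String) (out : Int) : Prop := out = get_free_urinals_alt urinals
instance (urinals : String) (out : Int) : Decidable (Spec_get_free_urinals urinals out) := by unfold Spec_get_free_urinals; infer_instance

-- ===== CLAIM (what is proved, stated in full; the proofs are below) =====
def Claim_equal_get_free_urinals : Prop := ∀ (urinals : String), Dom_get_free_urinals urinals → Spec_get_free_urinals urinals (get_free_urinals urinals)

-- ===== LEMMAS AND PROOFS =====

-- the sequential automaton both programs compute: `prev` = "the cell to the left is
-- free" (true at the left edge); place iff the cell is '0', prev holds and the next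
-- cell is absent or '0'.
def pvCount : Bool → List Char → Int
  | _, [] => 0
  | prev, c :: rest =>
    if c = '0' ∧ prev = true ∧ (rest.head? = none ∨ rest.head? = some '0')
    then 1 + pvCount false rest
    else pvCount (decide (c = '0')) rest


-- closed-form per-run count (Nat arithmetic; pvZf _ _ 0 = 0)
def pvZf (prev rb : Bool) (L : Nat) : Int :=
  if prev && rb then (((L + 1) / 2 : Nat) : Int)
  else if prev || rb then ((L / 2 : Nat) : Int)
  else (((L - 1) / 2 : Nat) : Int)


theorem pvIf_eq_pvZf (prev : Bool) (rest' : List Char) (L : Nat) (hL : 1 ≤ L) :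
    (if prev = true ∧ rest' = [] then PySem.Int.floordiv ((L:Int) + 1) 2
     else if prev = true ∨ rest' = [] then PySem.Int.floordiv (L:Int) 2
     else PySem.Int.floordiv ((L:Int) - 1) 2) = pvZf prev (decide (rest' = [])) L := by
  by_cases he : rest' = [] <;> cases prev <;>
    simp [he, pvZf] <;> omega

theorem pvCount_run : ∀ (L : Nat) (rest : List Char), rest.head? ≠ some '0' → ∀ prev : Bool,
    pvCount prev (List.replicate L '0' ++ rest) = pvZf prev (decide (rest = [])) L + pvCount false rest := by
  intro L
  induction L with
  | zero =>
    intro rest h prev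
    cases rest with
    | nil => cases prev <;> simp [pvCount, pvZf]
    | cons c t =>
      have hc : ¬ c = '0' := by simpa using h
      cases prev <;> simp [pvCount, hc, pvZf]
  | succ n ih =>
    intro rest h prev
    cases prev with
    | false =>
      have h1 : pvCount false (List.replicate (n+1) '0' ++ rest) = pvCount true (List.replicate n '0' ++ rest) := by
        simp [List.replicate_succ, pvCount]
      have h2 : pvZf false (decide (rest = [])) (n+1) = pvZf true (decide (rest = [])) n := by
        cases (decide (rest = [])) <;> simp [pvZf]
      rw [h1, ih rest h true, h2]
    | true =>
      rcases n with _ | m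
      · cases rest with
        | nil => simp [pvCount, pvZf]
        | cons c t =>
          have hc : ¬ c = '0' := by simpa using h
          simp [pvCount, hc, pvZf]
      · have h1 : pvCount true (List.replicate (m+2) '0' ++ rest) = 1 + pvCount false (List.replicate (m+1) '0' ++ rest) := by
          simp [List.replicate_succ, pvCount]
        have h2 : pvZf true (decide (rest = [])) (m+2) = 1 + pvZf false (decide (rest = [])) (m+1) := by
          cases (decide (rest = [])) <;> simp [pvZf] <;> omega
        rw [h1, ih rest h false, h2]
        ring

theorem pvAltGo_eq_aux : ∀ (n : Nat) (cs : List Char), cs.length ≤ n → ∀ prev : Bool,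
    pvAltGo cs prev = pvCount prev cs := by
  intro n
  induction n with
  | zero =>
    intro cs h prev
    have : cs = [] := by cases cs <;> simp_all
    subst this; simp [pvAltGo, pvCount]
  | succ n ih =>
    intro cs h prev
    cases cs with
    | nil => simp [pvAltGo, pvCount]
    | cons c rest =>
      by_cases hc : c = '0'
      · subst hc
        have hsplit : ('0'::rest).takeWhile (fun x => x = '0') ++ ('0'::rest).dropWhile (fun x => x = '0') = '0'::rest :=
          List.takeWhile_append_dropWhile
        have hrep : ('0'::rest).takeWhile (fun x => x = '0') =
            List.replicate (('0'::rest).takeWhile (fun x => x = '0')).length '0' := by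
          apply List.eq_replicate_of_mem
          intro b hb
          have := List.mem_takeWhile_imp hb
          simpa using this
        have hd : (('0'::rest).dropWhile (fun x => x = '0')).head? ≠ some '0' := by
          intro hh
          have := List.head?_dropWhile_not (fun x => x = '0') ('0'::rest)
          rw [hh] at this
          simp at this
        have htk : ('0'::rest).takeWhile (fun x => x = '0') = '0' :: rest.takeWhile (fun x => x = '0') := by
          simp [List.takeWhile]
        have hdw : ('0'::rest).dropWhile (fun x => x = '0') = rest.dropWhile (fun x => x = '0') := by
          simp [List.dropWhile]
        have hlen : (('0'::rest).dropWhile (fun x => x = '0')).length ≤ rest.length := by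
          rw [hdw]; exact List.length_dropWhile_le _ _
        rw [pvAltGo, dif_pos rfl]
        rw [ih _ (Nat.le_trans hlen (Nat.le_of_succ_le_succ h)) false]
        conv_rhs => rw [← hsplit]
        rw [hrep, pvCount_run _ _ hd prev]
        congr 1
        have hL : 1 ≤ (('0'::rest).takeWhile (fun x => x = '0')).length := by
          rw [htk]; simp
        rw [← hrep]
        exact pvIf_eq_pvZf prev _ _ hL
      · rw [pvAltGo, dif_neg hc]
        rw [ih rest (Nat.le_of_succ_le_succ h) false]
        simp [pvCount, hc]

theorem pvLoopA (cs : List Char) : ∀ (m k : Nat) (arr : List Char) (free : Int),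
    m = cs.length - k → k ≤ cs.length → arr.length = cs.length → arr.drop k = cs.drop k →
    ((PySem.List.pyRange (k : Int) (cs.length : Int) 1).foldl
      (fun (st : List Char × Int) (i : Int) =>
        if PySem.List.pyGetD st.1 i ' ' = '0' then
          if (i = 0 ∨ PySem.List.pyGetD st.1 (i - 1) ' ' = '0') ∧
             (i + 1 = (cs.length : Int) ∨ PySem.List.pyGetD st.1 (i + 1) ' ' = '0') then
            (PySem.List.pySetD st.1 i '1', st.2 + 1)
          else st
        else st)
      (arr, free)).2
    = free + pvCount (decide (k = 0 ∨ arr.getD (k - 1) ' ' = '0')) (cs.drop k) := by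
  intro m
  induction m with
  | zero =>
    intro k arr free hm hk _ _
    have hke : k = cs.length := by omega
    subst hke
    rw [PySem.List.pyRange_one_eq_nil (le_refl _)]
    simp [pvCount, List.drop_of_length_le (le_refl cs.length)]
  | succ m ih =>
    intro k arr free hm hk hlen hdrop
    have hklt : k < cs.length := by omega
    rw [PySem.List.pyRange_one_cons (by exact_mod_cast hklt)]
    rw [List.foldl_cons]
    -- the current cell
    have harrk : ∀ d, PySem.List.pyGetD arr (k : Int) d = cs[k] := by
      intro d
      rw [PySem.List.pyGetD_natCast]
      have h1 : arr[k]? = cs[k]? := by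
        have := congrArg (fun l : List Char => l[0]?) hdrop
        simpa [List.getElem?_drop] using this
      simp [List.getD, h1, hklt]
    -- the next cell as an option
    have harrk1 : arr[k+1]? = cs[k+1]? := by
      have := congrArg (fun l : List Char => l[1]?) hdrop
      simpa [List.getElem?_drop] using this
    have hdropk : cs.drop k = cs[k] :: cs.drop (k+1) := List.drop_eq_getElem_cons hklt
    have hdrop1 : arr.drop (k+1) = cs.drop (k+1) := by
      have := congrArg (fun l : List Char => l.tail) hdrop
      simpa [List.tail_drop] using this
    -- right-neighbour condition of A ↔ of pvCount
    have hnext : ((k : Int) + 1 = (cs.length : Int) ∨ PySem.List.pyGetD arr ((k : Int) + 1) ' ' = '0')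
        ↔ ((cs.drop (k+1)).head? = none ∨ (cs.drop (k+1)).head? = some '0') := by
      have hh : (cs.drop (k+1)).head? = cs[k+1]? := by simp [List.head?_drop]
      by_cases he : k + 1 = cs.length
      · constructor
        · intro _; left; rw [hh]; exact List.getElem?_eq_none (by omega)
        · intro _; left; exact_mod_cast congrArg (Nat.cast : Nat → Int) he
      · have hlt : k + 1 < cs.length := by omega
        have hg : PySem.List.pyGetD arr ((k : Int) + 1) ' ' = cs[k+1] := by
          have : ((k : Int) + 1) = ((k + 1 : Nat) : Int) := by push_cast; ring
          rw [this, PySem.List.pyGetD_natCast]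
          simp [List.getD, harrk1, hlt]
        have hne : ¬((k : Int) + 1 = (cs.length : Int)) := by
          intro hh2; exact he (by exact_mod_cast hh2)
        rw [hg, hh, List.getElem?_eq_getElem hlt]
        simp [hne]
    -- left-neighbour condition of A ↔ prev
    have hprev : ((k : Int) = 0 ∨ PySem.List.pyGetD arr ((k : Int) - 1) ' ' = '0')
        ↔ (k = 0 ∨ arr.getD (k - 1) ' ' = '0') := by
      by_cases h0 : k = 0
      · subst h0; simp
      · have : ((k : Int) - 1) = ((k - 1 : Nat) : Int) := by omega
        rw [this, PySem.List.pyGetD_natCast]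
        simp [Int.natCast_eq_zero, h0]
    by_cases hc : cs[k] = '0'
    · -- current cell free
      rw [if_pos (by rw [harrk]; exact hc)]
      by_cases hplace : ((k : Int) = 0 ∨ PySem.List.pyGetD arr ((k : Int) - 1) ' ' = '0')
            ∧ ((k : Int) + 1 = (cs.length : Int) ∨ PySem.List.pyGetD arr ((k : Int) + 1) ' ' = '0')
      · rw [if_pos hplace]
        -- placed: new array arr.set k '1'
        have hset : PySem.List.pySetD arr (k : Int) '1' = arr.set k '1' := PySem.List.pySetD_natCast arr k '1'
        rw [hset]
        have hIH := ih (k+1) (arr.set k '1') (free + 1) (by omega) (by omega)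
          (by simpa using hlen)
          (by rw [show List.drop (k+1) (arr.set k '1') = List.drop (k+1) arr from by
                    simp [List.drop_set]]
              exact hdrop1)
        have hget1 : (arr.set k '1').getD (k + 1 - 1) ' ' = '1' := by
          simp [List.getD, hklt, hlen]
        rw [hget1] at hIH
        have hdec : (decide (k + 1 = 0 ∨ ('1' : Char) = '0')) = false := by simp
        rw [hdec] at hIH
        push_cast at hIH
        rw [hIH, hdropk]
        have hcnd : (cs[k] = '0' ∧ (decide (k = 0 ∨ arr.getD (k - 1) ' ' = '0')) = true ∧
            ((cs.drop (k+1)).head? = none ∨ (cs.drop (k+1)).head? = some '0')) :=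
          ⟨hc, decide_eq_true (hprev.mp hplace.1), hnext.mp hplace.2⟩
        rw [pvCount, if_pos hcnd]
        ring
      · rw [if_neg hplace]
        have harrk' : arr.getD k ' ' = cs[k] := by
          have := harrk ' '
          rwa [PySem.List.pyGetD_natCast] at this
        have hIH := ih (k+1) arr free (by omega) (by omega) hlen hdrop1
        have hdec : (decide (k + 1 = 0 ∨ arr.getD (k + 1 - 1) ' ' = '0')) = decide (cs[k] = '0') := by
          rw [show k + 1 - 1 = k from rfl, harrk']
          simp
        rw [hdec] at hIH
        push_cast at hIH
        rw [hIH, hdropk]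
        have hcnd : ¬(cs[k] = '0' ∧ (decide (k = 0 ∨ arr.getD (k - 1) ' ' = '0')) = true ∧
            ((cs.drop (k+1)).head? = none ∨ (cs.drop (k+1)).head? = some '0')) := by
          intro hcon
          exact hplace ⟨hprev.mpr (of_decide_eq_true hcon.2.1), hnext.mpr hcon.2.2⟩
        rw [pvCount, if_neg hcnd]
    · -- current cell not free
      rw [if_neg (by rw [harrk]; exact hc)]
      have harrk' : arr.getD k ' ' = cs[k] := by
        have := harrk ' '
        rwa [PySem.List.pyGetD_natCast] at this
      have hIH := ih (k+1) arr free (by omega) (by omega) hlen hdrop1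
      have hdec : (decide (k + 1 = 0 ∨ arr.getD (k + 1 - 1) ' ' = '0')) = decide (cs[k] = '0') := by
        rw [show k + 1 - 1 = k from rfl, harrk']
        simp
      rw [hdec] at hIH
      push_cast at hIH
      rw [hIH, hdropk]
      have hcnd : ¬(cs[k] = '0' ∧ (decide (k = 0 ∨ arr.getD (k - 1) ' ' = '0')) = true ∧
          ((cs.drop (k+1)).head? = none ∨ (cs.drop (k+1)).head? = some '0')) := by
        intro hcon; exact hc hcon.1
      rw [pvCount, if_neg hcnd]

-- ===== VERDICT (by name: the statement is the Claim_ definition above) =====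
theorem get_free_urinals_spec : Claim_equal_get_free_urinals := by
  intro s _
  unfold Spec_get_free_urinals get_free_urinals get_free_urinals_alt
  by_cases hg : PySem.Str.isIn "11" s = true
  · rw [if_pos hg, if_pos hg]
  · rw [if_neg hg, if_neg hg]
    simp only []
    rw [pvAltGo_eq_aux s.toList.length s.toList (le_refl _) true]
    have h0 := pvLoopA s.toList s.toList.length 0 s.toList 0 (by omega) (by omega) rfl rfl
    simp at h0
    simpa using h0
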